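-- pv_equiv track=rewrite | github.com/ryuryukke/OUTFOX | src/detection/baseline_detection_dev.py | apply_extracted_fills
-- ===== SOURCE A (Python) =====
-- def count_masks(texts):
--     return [len([x for x in text.split() if x.startswith("<extra_id_")]) for text in texts]
--
-- def apply_extracted_fills(masked_texts, extracted_fills):
--     # split masked text into tokens, only splitting on spaces (not newlines)
--     tokens = [x.split(" ") for x in masked_texts]
--
--     n_expected = count_masks(masked_texts)
--
--     tmp_tokens = tokens[:]
--     # replace each mask token with the corresponding fill
--     for idx, (text, fills, n) in enumerate(zip(tmp_tokens, extracted_fills, n_expected)):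
--         if len(fills) < n:
--             tokens[idx] = []
--         else:
--             for fill_idx in range(n):
--                 text[text.index(f"<extra_id_{fill_idx}>")] = fills[fill_idx]
--             tokens[idx] = text
--
--     # join tokens back into text
--     texts = [" ".join(x) for x in tokens]
--     return texts
-- ===== SOURCE B (Python) =====
-- def apply_extracted_fills(masked_texts, extracted_fills):
--     # one pass per text: build a mask->fill dict once, replace each mask token on sight
--     texts = []
--     for text, fills in zip(masked_texts, extracted_fills):
--         n = len([w for w in text.split() if w.startswith("<extra_id_")])
--         if len(fills) < n:
--             texts.append("")
--         else:
--             pending = {f"<extra_id_{i}>": fills[i] for i in range(n)}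
--             out_tokens = []
--             for t in text.split(" "):
--                 if t in pending:
--                     out_tokens.append(pending.pop(t))
--                 else:
--                     out_tokens.append(t)
--             texts.append(" ".join(out_tokens))
--     texts.extend(masked_texts[len(extracted_fills):])
--     return texts
-- ===== Notes on version B (the rewrite author's own statement) =====
-- stated objective: faster
-- what changed: A repeatedly scans the token list with list.index for each mask (and mutates it in place); B builds the mask->fill dict once and does a single left-to-right pass over the tokens, replacing the first occurrence of each mask via an O(1) dict pop.
-- outside the precondition, e.g. on apply_extracted_fills(['a <extra_id_0>b c'], [['X']]): A raises ValueError, B returns ['a <extra_id_0>b c']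
import Mathlib
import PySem

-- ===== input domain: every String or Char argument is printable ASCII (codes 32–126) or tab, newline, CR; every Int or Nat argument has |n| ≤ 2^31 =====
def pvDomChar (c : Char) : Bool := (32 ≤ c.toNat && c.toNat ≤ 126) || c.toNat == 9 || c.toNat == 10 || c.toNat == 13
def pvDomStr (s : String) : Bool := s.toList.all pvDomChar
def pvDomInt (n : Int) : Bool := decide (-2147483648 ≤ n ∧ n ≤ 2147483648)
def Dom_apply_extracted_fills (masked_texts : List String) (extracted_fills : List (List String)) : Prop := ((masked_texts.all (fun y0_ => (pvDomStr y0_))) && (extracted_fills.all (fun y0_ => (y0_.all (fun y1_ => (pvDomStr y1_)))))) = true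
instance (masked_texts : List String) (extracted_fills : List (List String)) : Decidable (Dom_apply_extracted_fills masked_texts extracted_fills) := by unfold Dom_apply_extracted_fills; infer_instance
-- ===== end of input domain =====

-- B replaces A's per-mask list.index scans by a single pass over the tokens with a
-- mask->fill dict built once (objective: faster). Equivalence of RETURN values is proved
-- on Pre_ below; A mutates no caller-visible argument.

-- shared f-string helper: f"<extra_id_{i}>"
def pvMask (i : Nat) : String :=
  String.ofList ("<extra_id_".toList ++ PySem.Int.toChars (i : Int) ++ ['>'])

-- s.split(" ") (sep is the non-empty literal " ", so Str.split? is always `some`)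
def pvSplitSpace (s : String) : List String := (PySem.Str.split? s " ").getD []

-- len([x for x in text.split() if x.startswith("<extra_id_")]) — the mask count of one text
def pvCountMasks (text : String) : Nat :=
  ((PySem.Str.split₀ text).filter (fun w => PySem.Str.startswith w "<extra_id_")).length

-- ===== PORT A =====
def count_masks (texts : List String) : List Nat :=
  texts.map (fun text => pvCountMasks text)

-- inner `for fill_idx in range(n)` loop: text[text.index(mask)] = fills[fill_idx]
-- (List.index? = none is exactly Python's ValueError; excluded by Pre_)
def pvAFillLoop (text : List String) (fills : List String) (n : Nat) : List String :=
  (List.range n).foldl (fun text fill_idx =>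
    match PySem.List.index? text (pvMask fill_idx) with
    | some j => text.set j (fills.getD fill_idx "")
    | none => text) text

def apply_extracted_fills (masked_texts : List String) (extracted_fills : List (List String)) : List String :=
  let tokens := masked_texts.map (fun x => pvSplitSpace x)
  let n_expected := count_masks masked_texts
  let zipped := tokens.zip (extracted_fills.zip n_expected)
  let processed := zipped.map (fun p =>
    if p.2.1.length < p.2.2 then ([] : List String)
    else pvAFillLoop p.1 p.2.1 p.2.2)
  let tokens' := processed ++ tokens.drop zipped.length
  tokens'.map (fun x => PySem.Str.join " " x)

-- ===== PORT B =====
def pvBProcess (text : String) (fills : List String) : String :=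
  let n := pvCountMasks text
  if fills.length < n then ""
  else
    let pending : PySem.Dict String String :=
      (List.range n).foldl (fun d i => d.insert (pvMask i) (fills.getD i "")) PySem.Dict.empty
    let st := (pvSplitSpace text).foldl
      (fun (acc : List String × PySem.Dict String String) t =>
        match PySem.Dict.pop? acc.2 t with
        | some pv => (acc.1 ++ [pv.1], pv.2)
        | none => (acc.1 ++ [t], acc.2)) ([], pending)
    PySem.Str.join " " st.1

def apply_extracted_fills_alt (masked_texts : List String) (extracted_fills : List (List String)) : List String :=
  ((masked_texts.zip extracted_fills).foldl
    (fun texts p => texts ++ [pvBProcess p.1 p.2]) [])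
  ++ masked_texts.drop extracted_fills.length

-- ===== PRECONDITION & SPEC =====
-- Pre_ excludes (a) texts whose counted masks are not all present as exact space-separated
-- tokens, where A raises ValueError, and (b) pairs where an earlier fill is itself a later
-- mask token, where A's sequential in-place replacement may re-replace a just-inserted fill
-- (an artefact of A's mutation; both orders are defensible there).
def Pre_apply_extracted_fills (masked_texts : List String) (extracted_fills : List (List String)) : Prop :=
  ∀ p ∈ masked_texts.zip extracted_fills,
    p.2.length < pvCountMasks p.1 ∨
      ((∀ i < pvCountMasks p.1, pvMask i ∈ pvSplitSpace p.1) ∧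
       (∀ j < pvCountMasks p.1, ∀ i < j, p.2.getD i "" ≠ pvMask j))
instance (masked_texts : List String) (extracted_fills : List (List String)) : Decidable (Pre_apply_extracted_fills masked_texts extracted_fills) := by unfold Pre_apply_extracted_fills; infer_instance

def pvWitness_apply_extracted_fills : List String × List (List String) :=
  (["a <extra_id_0> likes <extra_id_1>", "no masks"], [["cat", "dog"], []])

def Spec_apply_extracted_fills (masked_texts : List String) (extracted_fills : List (List String)) (out : List String) : Prop := out = apply_extracted_fills_alt masked_texts extracted_fills
instance (masked_texts : List String) (extracted_fills : List (List String)) (out : List String) : Decidable (Spec_apply_extracted_fills masked_texts extracted_fills out) := by unfold Spec_apply_extracted_fills; infer_instance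

-- ===== CLAIM (what is proved, stated in full; the proofs are below) =====
def Claim_equal_apply_extracted_fills : Prop := ∀ (masked_texts : List String) (extracted_fills : List (List String)), Dom_apply_extracted_fills masked_texts extracted_fills → Pre_apply_extracted_fills masked_texts extracted_fills → Spec_apply_extracted_fills masked_texts extracted_fills (apply_extracted_fills masked_texts extracted_fills)

-- ===== LEMMAS AND PROOFS =====

-- ---- decimal decoding: Nat.toDigits 10 (hence pvMask) is injective ----
def pvDec (a : Nat) (l : List Char) : Nat := l.foldl (fun a c => a * 10 + (c.toNat - 48)) a

theorem pvDec_append (a : Nat) (l₁ l₂ : List Char) : pvDec a (l₁ ++ l₂) = pvDec (pvDec a l₁) l₂ := by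
  simp [pvDec, List.foldl_append]

theorem pvDigitChar_decode (m : Nat) (h : m < 10) : (Nat.digitChar m).toNat - 48 = m := by
  interval_cases m <;> decide

theorem pvToDigitsCore_suffix (b : Nat) :
    ∀ (f n : Nat) (l : List Char), Nat.toDigitsCore b f n l = Nat.toDigitsCore b f n [] ++ l := by
  intro f
  induction f with
  | zero => intro n l; simp [Nat.toDigitsCore]
  | succ f ih =>
    intro n l
    simp only [Nat.toDigitsCore]
    by_cases h : n / b = 0
    · simp [h]
    · simp only [h, if_false]
      rw [ih (n / b) ((n % b).digitChar :: l), ih (n / b) [(n % b).digitChar]]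
      simp

theorem pvDec_toDigitsCore : ∀ (f n : Nat), n ≤ f → pvDec 0 (Nat.toDigitsCore 10 f n []) = n := by
  intro f
  induction f with
  | zero => intro n hn; interval_cases n; simp [Nat.toDigitsCore, pvDec]
  | succ f ih =>
    intro n hn
    simp only [Nat.toDigitsCore]
    by_cases h : n / 10 = 0
    · have h10 : n < 10 := by omega
      simp [h, pvDec, pvDigitChar_decode _ (Nat.mod_lt n (by norm_num))]
      omega
    · simp only [h, if_false]
      rw [pvToDigitsCore_suffix]
      rw [pvDec_append, ih (n / 10) (by omega)]
      have : (n % 10).digitChar.toNat - 48 = n % 10 := pvDigitChar_decode _ (Nat.mod_lt n (by norm_num))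
      simp [pvDec, this]
      omega

theorem pvDec_toDigits (n : Nat) : pvDec 0 (Nat.toDigits 10 n) = n :=
  pvDec_toDigitsCore (n + 1) n (by omega)

theorem pvMask_inj {i j : Nat} (h : pvMask i = pvMask j) : i = j := by
  have h1 : ("<extra_id_".toList ++ PySem.Int.toChars (i : Int) ++ ['>'])
      = ("<extra_id_".toList ++ PySem.Int.toChars (j : Int) ++ ['>']) := by
    have := congrArg String.toList h
    simpa [pvMask, String.toList_ofList] using this
  have h2 : PySem.Int.toChars (i : Int) = PySem.Int.toChars (j : Int) := by
    rw [List.append_assoc, List.append_assoc] at h1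
    have := List.append_cancel_left h1
    exact List.append_cancel_right this
  have h3 : Nat.toDigits 10 i = Nat.toDigits 10 j := by
    simpa [PySem.Int.toChars] using h2
  calc i = pvDec 0 (Nat.toDigits 10 i) := (pvDec_toDigits i).symm
    _ = pvDec 0 (Nat.toDigits 10 j) := by rw [h3]
    _ = j := pvDec_toDigits j

-- ---- replace-first, and A's index?/set step computes it ----
def pvReplF (k v : String) : List String → List String
  | [] => []
  | t :: ts => if t = k then v :: ts else t :: pvReplF k v ts

theorem pvIndexSet_eq_replF (k v : String) (l : List String) :
    (match PySem.List.index? l k with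
     | some j => l.set j v
     | none => l) = pvReplF k v l := by
  induction l with
  | nil => simp [PySem.List.index?, pvReplF]
  | cons x xs ih =>
    by_cases hx : x = k
    · subst hx
      rw [PySem.List.index?_cons_self]
      simp [pvReplF]
    · rw [PySem.List.index?_cons_of_ne xs hx]
      cases h : PySem.List.index? xs k with
      | none => rw [h] at ih; simpa [pvReplF, hx, h] using ih
      | some j => rw [h] at ih; simpa [pvReplF, hx, h] using ih

-- ---- B's single pass, in recursive form ----
def pvPass (d : PySem.Dict String String) : List String → List String
  | [] => []
  | t :: ts =>
    if d.contains t then d.getD t "" :: pvPass (d.erase t) ts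
    else t :: pvPass d ts

theorem pvFoldl_pass (toks : List String) :
    ∀ (out : List String) (d : PySem.Dict String String),
      (toks.foldl (fun (acc : List String × PySem.Dict String String) t =>
        match PySem.Dict.pop? acc.2 t with
        | some pv => (acc.1 ++ [pv.1], pv.2)
        | none => (acc.1 ++ [t], acc.2)) (out, d)).1 = out ++ pvPass d toks := by
  induction toks with
  | nil => intro out d; simp [pvPass]
  | cons t ts ih =>
    intro out d
    cases hc : d.contains t with
    | true =>
      have hs : (d.get? t).isSome := by rw [← PySem.Dict.contains_eq_isSome_get?, hc]
      obtain ⟨v, hv⟩ := Option.isSome_iff_exists.mp hs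
      have hd : PySem.Dict.pop? d t = some (d.getD t "", d.erase t) := by
        simp [PySem.Dict.pop?, hv, PySem.Dict.getD]
      simp only [List.foldl_cons, hd]
      rw [ih]
      simp [pvPass, hc]
    | false =>
      have hn : d.get? t = none := by
        have := PySem.Dict.contains_eq_isSome_get? d t
        rw [hc] at this
        exact Option.not_isSome_iff_eq_none.mp (by simp [← this])
      have hd : PySem.Dict.pop? d t = none := by simp [PySem.Dict.pop?, hn]
      simp only [List.foldl_cons, hd]
      rw [ih]
      simp [pvPass, hc]

-- ---- dict facts about erase (not in the PySem book) ----
theorem pvErase_insert_self {d : PySem.Dict String String} {k : String} (v : String)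
    (hk : d.contains k = false) : (d.insert k v).erase k = d := by
  have hfa : ∀ p ∈ d.items, ¬(p.1 == k) = true := by
    intro p hp
    have := (List.any_eq_false).mp hk p hp
    simpa using this
  apply PySem.Dict.ext
  simp only [PySem.Dict.erase, PySem.Dict.insert, hk, Bool.false_eq_true, if_false]
  rw [List.filter_append, List.filter_eq_self.mpr (by intro p hp; simpa using hfa p hp)]
  simp

theorem pvContains_erase_false {d : PySem.Dict String String} {k t : String}
    (hk : d.contains k = false) : (d.erase t).contains k = false := by
  simp only [PySem.Dict.contains, PySem.Dict.erase, List.any_eq_false] at *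
  intro p hp
  exact hk p (List.mem_of_mem_filter hp)

theorem pvErase_insert_of_ne {d : PySem.Dict String String} {k t : String} (v : String)
    (hk : d.contains k = false) (h : t ≠ k) : (d.insert k v).erase t = (d.erase t).insert k v := by
  have hk' : (d.erase t).contains k = false := pvContains_erase_false hk
  apply PySem.Dict.ext
  simp only [PySem.Dict.insert, hk, hk', Bool.false_eq_true, if_false]
  simp only [PySem.Dict.erase]
  rw [List.filter_append]
  simp [Ne.symm h]

theorem pvValues_erase_subset {d : PySem.Dict String String} {t v : String}
    (h : v ∈ (d.erase t).values) : v ∈ d.values := by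
  simp only [PySem.Dict.values, PySem.Dict.erase, List.mem_map] at *
  obtain ⟨p, hp, rfl⟩ := h
  exact ⟨p, List.mem_of_mem_filter hp, rfl⟩

theorem pvGetD_mem_values {d : PySem.Dict String String} {t : String}
    (h : d.contains t = true) : d.getD t "" ∈ d.values := by
  have hs : (d.get? t).isSome := by rw [← PySem.Dict.contains_eq_isSome_get?, h]
  obtain ⟨v, hv⟩ := Option.isSome_iff_exists.mp hs
  have hgd : d.getD t "" = v := by simp [PySem.Dict.getD, hv]
  rw [hgd]
  simp only [PySem.Dict.get?, Option.map_eq_some_iff] at hv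
  obtain ⟨p, hp, h2⟩ := hv
  have hmem := List.mem_of_find?_eq_some hp
  exact h2 ▸ List.mem_map.mpr ⟨p, hmem, rfl⟩

-- ---- the key commutation: replacing afterwards = one more pending key ----
theorem pvSwap (k v : String) (toks : List String) :
    ∀ (d : PySem.Dict String String), d.contains k = false → (∀ w ∈ d.values, w ≠ k) →
      pvReplF k v (pvPass d toks) = pvPass (d.insert k v) toks := by
  induction toks with
  | nil => intro d _ _; simp [pvPass, pvReplF]
  | cons t ts ih =>
    intro d hk hv
    by_cases ht : t = k
    · subst ht
      rw [pvPass, pvPass]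
      simp only [hk, Bool.false_eq_true, if_false, PySem.Dict.contains_insert_self, if_true,
        PySem.Dict.getD_insert_self, pvErase_insert_self v hk]
      simp [pvReplF]
    · rw [pvPass, pvPass]
      have hci : (d.insert k v).contains t = (d.contains t) := by
        rw [PySem.Dict.contains_insert]
        simp [ht]
      cases hc : d.contains t with
      | true =>
        simp only [hc, if_true, hci]
        have hval : d.getD t "" ≠ k := hv _ (pvGetD_mem_values hc)
        rw [pvReplF, if_neg hval]
        rw [PySem.Dict.getD_insert_of_ne d v "" ht, pvErase_insert_of_ne v hk ht]
        rw [ih (d.erase t) (pvContains_erase_false hk)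
          (fun w hw => hv w (pvValues_erase_subset hw))]
      | false =>
        simp only [hc, Bool.false_eq_true, if_false, hci]
        rw [pvReplF, if_neg ht]
        rw [ih d hk hv]

-- ---- A's loop equals B's pass ----
def pvPending (fills : List String) (n : Nat) : PySem.Dict String String :=
  (List.range n).foldl (fun d i => d.insert (pvMask i) (fills.getD i "")) PySem.Dict.empty

theorem pvPass_empty (toks : List String) : pvPass PySem.Dict.empty toks = toks := by
  induction toks with
  | nil => rfl
  | cons t ts ih => rw [pvPass]; simp [PySem.Dict.contains_empty, ih]

theorem pvPending_contains_false (fills : List String) (n : Nat) :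
    (pvPending fills n).contains (pvMask n) = false := by
  by_contra hc
  have hc' : (pvPending fills n).contains (pvMask n) = true := by
    cases h : (pvPending fills n).contains (pvMask n) with
    | true => rfl
    | false => exact absurd h hc
  have hm : pvMask n ∈ (pvPending fills n).keys :=
    (PySem.Dict.contains_iff_mem_keys _ _).mp hc'
  rw [pvPending, PySem.Dict.keys_foldl_insert_key] at hm
  simp only [PySem.Dict.keys_empty] at hm
  have hm' : pvMask n ∈ PySem.Set.ofList ((List.range n).map pvMask) := by
    simpa [PySem.Set.update, PySem.Set.ofList_eq_foldl] using hm
  have hm2 : pvMask n ∈ (List.range n).map pvMask := (PySem.Set.mem_ofList _ _).mp hm' 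
  obtain ⟨i, hi, hmask⟩ := List.mem_map.mp hm2
  have := pvMask_inj hmask
  have := List.mem_range.mp hi
  omega

theorem pvPending_values (fills : List String) (n : Nat) {w : String}
    (hw : w ∈ (pvPending fills n).values) : ∃ i < n, w = fills.getD i "" := by
  have hitems : (pvPending fills n).items
      = (List.range n).map (fun i => (pvMask i, fills.getD i "")) := by
    rw [pvPending]
    rw [PySem.Dict.items_foldl_insert_fresh (List.range n) pvMask (fun i => fills.getD i "")
      PySem.Dict.empty (by intro a _; exact PySem.Dict.contains_empty _)
      (List.Nodup.map (fun a b hab => pvMask_inj hab) List.nodup_range)]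
    simp [PySem.Dict.empty]
  rw [PySem.Dict.values, hitems] at hw
  simp only [List.map_map, List.mem_map] at hw
  obtain ⟨i, hi, rfl⟩ := hw
  exact ⟨i, List.mem_range.mp hi, rfl⟩

theorem pvMain (toks fills : List String) :
    ∀ n : Nat, (∀ j < n, ∀ i < j, fills.getD i "" ≠ pvMask j) →
      pvAFillLoop toks fills n = pvPass (pvPending fills n) toks := by
  intro n
  induction n with
  | zero =>
    intro _
    simp [pvAFillLoop, pvPending, pvPass_empty]
  | succ n ih =>
    intro hf
    have hstep : pvAFillLoop toks fills (n + 1)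
        = pvReplF (pvMask n) (fills.getD n "") (pvAFillLoop toks fills n) := by
      rw [pvAFillLoop, pvAFillLoop, List.range_succ, List.foldl_append]
      simp only [List.foldl_cons, List.foldl_nil]
      exact pvIndexSet_eq_replF _ _ _
    have hpend : pvPending fills (n + 1)
        = (pvPending fills n).insert (pvMask n) (fills.getD n "") := by
      rw [pvPending, pvPending, List.range_succ, List.foldl_append]
      simp
    rw [hstep, ih (fun j hj i hi => hf j (by omega) i hi), hpend]
    exact pvSwap _ _ toks (pvPending fills n) (pvPending_contains_false fills n)
      (fun w hw => by
        obtain ⟨i, hi, rfl⟩ := pvPending_values fills n hw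
        exact hf n (by omega) i hi)

-- ---- join/split identity ----
theorem pvInterSnoc (sep y : List Char) (xs : List (List Char)) :
    sep.intercalate (xs ++ [y])
      = sep.intercalate xs ++ (if xs = [] then [] else sep) ++ y := by
  induction xs with
  | nil => simp [List.intercalate]
  | cons x xs ih =>
    cases xs with
    | nil => simp [List.intercalate, List.intersperse]
    | cons z zs =>
      have h1 : sep.intercalate (x :: z :: zs) = x ++ sep ++ sep.intercalate (z :: zs) := by
        simp [List.intercalate, List.intersperse]
      have h2 : sep.intercalate (x :: ((z :: zs) ++ [y]))
          = x ++ sep ++ sep.intercalate ((z :: zs) ++ [y]) := by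
        simp [List.intercalate, List.intersperse]
      rw [List.cons_append, h2, ih, h1]
      simp

theorem pvGoInter (sep : List Char) (hsep : sep ≠ []) :
    ∀ (fuel : Nat) (l cur : List Char) (acc : List (List Char)), l.length ≤ fuel →
      sep.intercalate (PySem.Chars.splitOn.go sep fuel l cur acc)
        = sep.intercalate acc.reverse ++ (if acc = [] then [] else sep) ++ cur.reverse ++ l := by
  intro fuel
  induction fuel with
  | zero =>
    intro l cur acc hl
    have : l = [] := List.length_eq_zero_iff.mp (by omega)
    subst this
    rw [PySem.Chars.splitOn.go]
    rw [show ((cur.reverse ++ []) :: acc).reverse = acc.reverse ++ [cur.reverse ++ []] by simp]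
    rw [pvInterSnoc]
    simp
  | succ fuel ih =>
    intro l cur acc hl
    cases l with
    | nil =>
      rw [PySem.Chars.splitOn.go.eq_def]
      simp only []
      rw [show (cur.reverse :: acc).reverse = acc.reverse ++ [cur.reverse] by simp]
      rw [pvInterSnoc]
      simp
    | cons c rest =>
      rw [PySem.Chars.splitOn.go]
      by_cases hpre : sep.isPrefixOf (c :: rest) = true
      · simp only [hpre, if_true]
        have hdrop : ((c :: rest).drop sep.length).length ≤ fuel := by
          have hsl : 1 ≤ sep.length := by
            cases sep with
            | nil => exact absurd rfl hsep
            | cons a b => simp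
          simp only [List.length_drop, List.length_cons] at *
          omega
        rw [ih _ [] (cur.reverse :: acc) hdrop]
        rw [show (cur.reverse :: acc).reverse = acc.reverse ++ [cur.reverse] by simp]
        rw [pvInterSnoc]
        have hl2 : sep ++ (c :: rest).drop sep.length = c :: rest :=
          List.prefix_iff_eq_append.mp (List.isPrefixOf_iff_prefix.mp hpre)
        rw [← hl2]
        simp
      · simp only [hpre, Bool.false_eq_true, if_false]
        rw [ih rest (c :: cur) acc (by simpa using Nat.le_of_succ_le_succ (by simpa using hl))]
        simp

theorem pvJoinSplitChars (s : List Char) :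
    PySem.Chars.join [' '] (PySem.Chars.splitOn s [' ']) = s := by
  rw [PySem.Chars.splitOn, PySem.Chars.join]
  rw [pvGoInter [' '] (by simp) (s.length + 1) s [] [] (by omega)]
  simp [List.intercalate]

theorem pvJoinSplit (t : String) : PySem.Str.join " " (pvSplitSpace t) = t := by
  rw [pvSplitSpace, PySem.Str.split?, PySem.Chars.split?, PySem.Str.join]
  simp only [show (" ".toList : List Char) = [' '] from rfl, List.isEmpty_cons,
    Bool.false_eq_true, if_false, Option.map_some, Option.getD_some, List.map_map]
  rw [show List.map (String.toList ∘ String.ofList) (PySem.Chars.splitOn t.toList [' '])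
      = PySem.Chars.splitOn t.toList [' '] by simp [Function.comp_def]]
  rw [pvJoinSplitChars]
  exact String.ofList_toList

theorem pvMapJoinSplit (l : List String) :
    l.map (fun x => PySem.Str.join " " (pvSplitSpace x)) = l := by
  induction l with
  | nil => rfl
  | cons t ts ih => simp [pvJoinSplit]

-- ---- per-text equality ----
theorem pvPerElem (t : String) (fills : List String)
    (h : fills.length < pvCountMasks t ∨
      ((∀ i < pvCountMasks t, pvMask i ∈ pvSplitSpace t) ∧
       (∀ j < pvCountMasks t, ∀ i < j, fills.getD i "" ≠ pvMask j))) :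
    PySem.Str.join " "
      (if fills.length < pvCountMasks t then ([] : List String)
       else pvAFillLoop (pvSplitSpace t) fills (pvCountMasks t)) = pvBProcess t fills := by
  by_cases hlt : fills.length < pvCountMasks t
  · simp only [pvBProcess, if_pos hlt]
    rfl
  · simp only [pvBProcess, if_neg hlt]
    have hf : ∀ j < pvCountMasks t, ∀ i < j, fills.getD i "" ≠ pvMask j := by
      rcases h with h | h
      · exact absurd h hlt
      · exact h.2
    rw [pvFoldl_pass (pvSplitSpace t) []]
    rw [pvMain (pvSplitSpace t) fills (pvCountMasks t) hf]
    simp [pvPending]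

-- ---- the list-level assembly ----
theorem pvAB (masked_texts : List String) (extracted_fills : List (List String))
    (hpre : Pre_apply_extracted_fills masked_texts extracted_fills) :
    apply_extracted_fills masked_texts extracted_fills
      = apply_extracted_fills_alt masked_texts extracted_fills := by
  induction masked_texts generalizing extracted_fills with
  | nil => cases extracted_fills <;> rfl
  | cons t ts ih =>
    cases extracted_fills with
    | nil =>
      show (((t :: ts).map pvSplitSpace).map (fun x => PySem.Str.join " " x)) = _
      rw [List.map_map]
      show (t :: ts).map (fun x => PySem.Str.join " " (pvSplitSpace x)) = _
      rw [pvMapJoinSplit]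
      rfl
    | cons f fs =>
      have hhead := hpre (t, f) (by simp)
      have htail : Pre_apply_extracted_fills ts fs := by
        intro p hp
        exact hpre p (by simp [hp])
      have hA : apply_extracted_fills (t :: ts) (f :: fs)
          = PySem.Str.join " "
              (if f.length < pvCountMasks t then ([] : List String)
               else pvAFillLoop (pvSplitSpace t) f (pvCountMasks t))
            :: apply_extracted_fills ts fs := by
        simp only [apply_extracted_fills, count_masks, List.map_cons, List.zip_cons_cons,
          List.length_cons, List.drop_succ_cons]
        rfl
      have hB : apply_extracted_fills_alt (t :: ts) (f :: fs)
          = pvBProcess t f :: apply_extracted_fills_alt ts fs := by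
        simp only [apply_extracted_fills_alt, List.zip_cons_cons, List.length_cons,
          List.drop_succ_cons]
        rw [PySem.List.foldl_append_singleton_eq_map, PySem.List.foldl_append_singleton_eq_map]
        simp
      rw [hA, hB, ih fs htail, pvPerElem t f (by simpa using hhead)]

-- ===== VERDICT (by name: the statement is the Claim_ definition above) =====
theorem apply_extracted_fills_spec : Claim_equal_apply_extracted_fills := by
  intro masked_texts extracted_fills _ hpre
  unfold Spec_apply_extracted_fills
  exact pvAB masked_texts extracted_fills hpre
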